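-- pv_equiv track=rewrite | github.com/Emilioledo/IP-2025 | python/practicas/practica_7.py | fila_ordenadas
-- ===== SOURCE A (Python) =====
-- def ordenados(s: list[int]) -> bool:
--     primer_elemento = s[0]
--     for i in s[1:]:
--         if (primer_elemento + 1 == i):
--             primer_elemento = i
--         else:
--             return False
--     return True
--
-- def es_matriz(s: list[list[int]]) -> bool:
--     elementos_fila: list[int] = []
--     for fila in s:
--         elementos_fila.append(len(fila))
--
--     primer_elemento_fila: int = elementos_fila[0]
--     for elemento in elementos_fila:
--         if elemento != primer_elemento_fila:
--             return False
--         else: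
--             primer_elemento_fila = elemento
--     return True
--
-- def fila_ordenadas(s: list[list[int]]) -> list[bool]:
--     if(es_matriz(s)):
--         resultado: list[bool] = []
--         for fila in s:
--             if(ordenados(fila)):
--                 resultado.append(True)
--             else:
--                 resultado.append(False)
--         return resultado
-- ===== SOURCE B (Python) =====
-- def fila_ordenadas(s: list[list[int]]) -> list[bool]:
--     n = len(s[0])
--     if not all(len(f) == n for f in s):
--         return None
--     return [f == list(range(f[0], f[0] + len(f))) for f in s]
-- ===== Notes on version B (the rewrite author's own statement) =====
-- stated objective: idiomatic
-- what changed: Inlined the two helpers into one function; each row is judged by comparing it for equality with the consecutive range it should equal (f == list(range(f[0], f[0]+len(f)))) instead of walking adjacent pairs with an accumulator, and rectangularity is a single all() over lengths instead of building a length list and scanning it.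
import Mathlib
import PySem

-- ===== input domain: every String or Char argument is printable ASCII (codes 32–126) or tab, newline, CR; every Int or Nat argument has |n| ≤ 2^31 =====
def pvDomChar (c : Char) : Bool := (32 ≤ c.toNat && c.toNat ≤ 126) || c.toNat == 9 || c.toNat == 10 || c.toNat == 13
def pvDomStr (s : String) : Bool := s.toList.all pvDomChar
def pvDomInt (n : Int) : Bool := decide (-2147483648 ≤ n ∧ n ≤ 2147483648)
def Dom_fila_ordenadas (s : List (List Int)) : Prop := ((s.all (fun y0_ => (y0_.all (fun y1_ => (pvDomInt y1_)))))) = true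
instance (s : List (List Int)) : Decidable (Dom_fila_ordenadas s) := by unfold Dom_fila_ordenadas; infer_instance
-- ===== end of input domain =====

-- B inlines A's two helpers and judges each row by comparing it for equality with the
-- consecutive range it should equal, instead of scanning adjacent pairs (objective: idiomatic).
-- Both A and B RAISE IndexError on empty s and on rectangular input with empty rows; Pre_ excludes exactly those.

-- ===== PORT A =====
-- for i in s[1:]: if primer+1 == i: primer = i else: return False
def pvOrdLoop : Int → List Int → Bool
  | _, [] => true
  | p, i :: rest => if p + 1 == i then pvOrdLoop i rest else false

def pvOrdenados (s : List Int) : Bool :=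
  match PySem.List.pyGet? s 0 with
  | none => false  -- s[0] raises IndexError in Python; unreachable under Pre_
  | some p => pvOrdLoop p (PySem.List.slice s (some 1) none)

def pvEsMatLoop : Int → List Int → Bool
  | _, [] => true
  | p, e :: rest => if e ≠ p then false else pvEsMatLoop e rest

def pvEsMatriz (s : List (List Int)) : Bool :=
  let elementos_fila : List Int := s.foldl (fun acc fila => acc ++ [(fila.length : Int)]) []
  match PySem.List.pyGet? elementos_fila 0 with
  | none => false  -- elementos_fila[0] raises IndexError on empty s; unreachable under Pre_
  | some p => pvEsMatLoop p elementos_fila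

def fila_ordenadas (s : List (List Int)) : Option (List Bool) :=
  if pvEsMatriz s then
    some (s.foldl (fun resultado fila =>
      resultado ++ [if pvOrdenados fila then true else false]) [])
  else none

-- ===== PORT B =====
def fila_ordenadas_alt (s : List (List Int)) : Option (List Bool) :=
  match PySem.List.pyGet? s 0 with
  | none => none  -- len(s[0]) raises IndexError in Python; unreachable under Pre_
  | some r0 =>
    let n : Int := r0.length
    if s.all (fun f => (f.length : Int) == n) then
      -- f[0]: raises on an empty row in Python; unreachable under Pre_ (headD 0 stands in)
      some (s.map (fun f =>
        f == PySem.List.pyRange (f.headD 0) (f.headD 0 + f.length) 1))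
    else none

-- ===== PRECONDITION & SPEC =====
-- Pre_ excludes exactly the inputs where the Python A raises IndexError: empty s
-- (elementos_fila[0]), and rectangular s whose rows are all empty (ordenados' s[0]).
def Pre_fila_ordenadas (s : List (List Int)) : Prop :=
  s ≠ [] ∧ ((∀ f ∈ s, f.length = (s.headD []).length) → s.headD [] ≠ [])
instance (s : List (List Int)) : Decidable (Pre_fila_ordenadas s) := by
  unfold Pre_fila_ordenadas; infer_instance

def pvWitness_fila_ordenadas : List (List Int) := [[1, 2, 3], [4, 5, 6], [7, 6, 5]]

def Spec_fila_ordenadas (s : List (List Int)) (out : Option (List Bool)) : Prop := out = fila_ordenadas_alt s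
instance (s : List (List Int)) (out : Option (List Bool)) : Decidable (Spec_fila_ordenadas s out) := by unfold Spec_fila_ordenadas; infer_instance

-- ===== CLAIM (what is proved, stated in full; the proofs are below) =====
def Claim_equal_fila_ordenadas : Prop := ∀ (s : List (List Int)), Dom_fila_ordenadas s → Pre_fila_ordenadas s → Spec_fila_ordenadas s (fila_ordenadas s)

-- ===== LEMMAS AND PROOFS =====

-- A's es_matriz loop checks every length equals the first (the running update is vacuous).
theorem pvEsMatLoop_eq_all (p : Int) (l : List Int) :
    pvEsMatLoop p l = l.all (fun e => e == p) := by
  induction l with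
  | nil => rfl
  | cons e rest ih =>
      by_cases h : e = p
      · subst h; simpa [pvEsMatLoop] using ih
      · simp [pvEsMatLoop, List.all_cons, h]

-- A's adjacent-pair loop recognises exactly the consecutive run starting at p+1.
theorem pvOrdLoop_eq_range (p : Int) (l : List Int) :
    pvOrdLoop p l = (l == PySem.List.pyRange (p + 1) (p + 1 + l.length) 1) := by
  induction l generalizing p with
  | nil =>
      simp only [pvOrdLoop, List.length_nil, Nat.cast_zero, add_zero]
      rw [PySem.List.pyRange_one_eq_nil (le_refl _)]
      simp
  | cons i rest ih =>
      rw [PySem.List.pyRange_one_cons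
        (by simp only [List.length_cons]; push_cast; omega : (p:Int) + 1 < p + 1 + ((i :: rest).length : Int))]
      by_cases h : p + 1 = i
      · subst h
        have h1 : pvOrdLoop p ((p+1) :: rest) = pvOrdLoop (p+1) rest := by simp [pvOrdLoop]
        rw [h1, ih (p + 1)]
        have hlen : (p : Int) + 1 + 1 + rest.length = p + 1 + ((rest.length : Int) + 1) := by ring
        simp [hlen]
      · simp [pvOrdLoop, h, Ne.symm h]

theorem foldl_append_singleton {α β : Type} (g : α → β) (l : List α) (acc : List β) :
    l.foldl (fun r x => r ++ [g x]) acc = acc ++ l.map g := by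
  induction l generalizing acc with
  | nil => simp
  | cons x rest ih => simp [List.foldl_cons, ih]

theorem pvOrdenados_eq (f : List Int) (hf : f ≠ []) :
    pvOrdenados f
      = (f == PySem.List.pyRange (f.headD 0) (f.headD 0 + f.length) 1) := by
  obtain ⟨x, rest, rfl⟩ := List.exists_cons_of_ne_nil hf
  have hget : PySem.List.pyGet? (x :: rest) 0 = some x := by
    simp [PySem.List.pyGet?, PySem.List.pyIdx?]
  have hslice : PySem.List.slice (x :: rest) (some 1) none = rest := by
    simp [PySem.List.slice_from]
  unfold pvOrdenados
  simp only [hget, hslice, pvOrdLoop_eq_range, List.headD_cons, List.length_cons,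
    Nat.cast_add, Nat.cast_one]
  rw [PySem.List.pyRange_one_cons (by omega : (x:Int) < x + ((rest.length : Int) + 1))]
  have hlen : (x : Int) + ((rest.length : Int) + 1) = x + 1 + rest.length := by
    ring
  simp [hlen]

-- ===== VERDICT (by name: the statement is the Claim_ definition above) =====
theorem fila_ordenadas_spec : Claim_equal_fila_ordenadas := by
  intro s _ hpre
  obtain ⟨hne, hrows⟩ := hpre
  obtain ⟨r0, rows, rfl⟩ := List.exists_cons_of_ne_nil hne
  unfold Spec_fila_ordenadas fila_ordenadas fila_ordenadas_alt pvEsMatriz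
  have hget : PySem.List.pyGet? (r0 :: rows) 0 = some r0 := by
    simp [PySem.List.pyGet?, PySem.List.pyIdx?]
  have hlens : (r0 :: rows).foldl (fun acc fila => acc ++ [(fila.length : Int)]) []
      = (r0 :: rows).map (fun fila => (fila.length : Int)) := by
    simpa using foldl_append_singleton (fun fila : List Int => (fila.length : Int)) (r0 :: rows) []
  have hgetl : PySem.List.pyGet? ((r0 :: rows).map (fun fila => (fila.length : Int))) 0
      = some (r0.length : Int) := by
    simp [PySem.List.pyGet?, PySem.List.pyIdx?]
  simp only [hlens, hgetl, hget, pvEsMatLoop_eq_all, List.all_map]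
  have hcond : ((r0 :: rows).all ((fun e => e == ((r0.length : Int))) ∘ fun fila => ((fila.length : Int))))
      = ((r0 :: rows).all fun f => ((f.length : Int)) == ((r0.length : Int))) := by
    simp [Function.comp_def]
  rw [hcond]
  by_cases hrect : ((r0 :: rows).all fun f => ((f.length : Int)) == ((r0.length : Int))) = true
  · have hrect' : ∀ f ∈ (r0 :: rows), f.length = (((r0 :: rows).headD [])).length := by
      intro f hf
      have := List.all_eq_true.mp hrect f hf
      simp at this ⊢
      exact_mod_cast this
    have hr0 : r0 ≠ [] := by simpa using hrows hrect'
    rw [if_pos hrect, if_pos hrect]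
    congr 1
    rw [foldl_append_singleton (fun fila => if pvOrdenados fila then true else false) (r0 :: rows) []]
    simp only [List.nil_append]
    apply List.map_congr_left
    intro f hf
    have hfne : f ≠ [] := by
      intro h
      have hlen := hrect' f hf
      rw [h] at hlen
      exact hr0 (List.eq_nil_of_length_eq_zero hlen.symm)
    rw [pvOrdenados_eq f hfne]
    rw [beq_eq_decide]
    cases hb : decide (f = PySem.List.pyRange (f.headD 0) (f.headD 0 + f.length) 1) <;> rfl
  · rw [if_neg hrect, if_neg hrect]
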